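-- pv_equiv track=rewrite | github.com/jpeloquin/prunetest | parse.py | expand_block
-- ===== SOURCE A (Python) =====
-- def expand_block(elements):
--     """Expand blocks of cycles to individual segments"""
--     expanded = []
--     active = []
--     for e in reversed(elements):
--         if e[0] == "segment":
--             active.append(e)
--         elif e[0] == "block":
--             active = active * e[1]["n"]
--             expanded += active
--             active = []
--             expanded.append(e)
--         else:
--             expanded += active
--             active = []
--             expanded.append(e)
--     expanded.reverse()
--     return expanded
-- ===== SOURCE B (Python) =====
-- def _flush(out, owner, buffer):
--     out.append(owner)
--     out += buffer * owner[1]["n"] if owner[0] == "block" else buffer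
--
-- def expand_block(elements):
--     """Expand blocks of cycles to individual segments (single forward pass)"""
--     out = []
--     owner = None
--     buffer = []
--     for e in elements:
--         if e[0] == "segment":
--             if owner is not None:
--                 buffer.append(e)
--         else:
--             if owner is not None:
--                 _flush(out, owner, buffer)
--             owner = e
--             buffer = []
--     if owner is not None:
--         _flush(out, owner, buffer)
--     return out
-- ===== Notes on version B (the rewrite author's own statement) =====
-- stated objective: simpler
-- what changed: Replaces A's reverse iteration with accumulator lists and a trailing reverse() by a single forward pass that keeps the current owner element and a buffer of its following segments, flushed at each owner change and once at the end.
import Mathlib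
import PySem

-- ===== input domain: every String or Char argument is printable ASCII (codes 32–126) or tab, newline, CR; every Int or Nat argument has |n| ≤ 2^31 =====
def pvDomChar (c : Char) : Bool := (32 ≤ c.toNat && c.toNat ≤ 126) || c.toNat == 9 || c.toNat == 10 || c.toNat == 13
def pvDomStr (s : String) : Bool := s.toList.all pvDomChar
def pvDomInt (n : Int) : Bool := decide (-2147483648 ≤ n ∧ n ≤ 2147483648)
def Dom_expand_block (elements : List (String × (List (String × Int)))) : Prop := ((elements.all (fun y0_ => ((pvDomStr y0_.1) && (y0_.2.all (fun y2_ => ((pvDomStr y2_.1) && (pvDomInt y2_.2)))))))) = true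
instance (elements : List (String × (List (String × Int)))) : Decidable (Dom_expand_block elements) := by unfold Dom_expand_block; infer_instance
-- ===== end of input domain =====

-- B replaces A's reversed-iteration + final reverse() with a single forward pass
-- keeping an `owner` element and a segment `buffer` that is flushed at each
-- owner change (objective: simpler decomposition; same output, same cost).


-- ===== PORT A =====
-- one iteration of A's `for e in reversed(elements)` loop over the state (expanded, active)
def pvStepA (s : List (String × (List (String × Int))) × List (String × (List (String × Int))))
    (e : String × (List (String × Int))) :
    List (String × (List (String × Int))) × List (String × (List (String × Int))) :=
  if e.1 = "segment" then (s.1, s.2 ++ [e])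
  else if e.1 = "block" then
    -- `active * e[1]["n"]`; the getD 0 is unreachable under Pre_ (Python raises KeyError there)
    (s.1 ++ PySem.List.pyRepeat s.2 ((List.lookup "n" e.2).getD 0) ++ [e], [])
  else
    (s.1 ++ s.2 ++ [e], [])

def expand_block (elements : List (String × (List (String × Int)))) :
    List (String × (List (String × Int))) :=
  ((elements.reverse).foldl pvStepA ([], [])).1.reverse

-- ===== PORT B =====
-- `_flush(out, owner, buffer)` from Source B: the appended part
def pvFlush (owner : String × (List (String × Int)))
    (buffer : List (String × (List (String × Int)))) :
    List (String × (List (String × Int))) :=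
  owner :: (if owner.1 = "block" then
              PySem.List.pyRepeat buffer ((List.lookup "n" owner.2).getD 0)
            else buffer)

-- one iteration of B's forward loop over the state (out, owner, buffer)
def pvStepB (s : List (String × (List (String × Int))) × Option (String × (List (String × Int))) × List (String × (List (String × Int))))
    (e : String × (List (String × Int))) :
    List (String × (List (String × Int))) × Option (String × (List (String × Int))) × List (String × (List (String × Int))) :=
  if e.1 = "segment" then
    match s.2.1 with
    | none => s
    | some o => (s.1, some o, s.2.2 ++ [e])
  else
    match s.2.1 with
    | none => (s.1, some e, [])
    | some o => (s.1 ++ pvFlush o s.2.2, some e, [])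

-- the final `if owner is not None: _flush(...)` of Source B
def pvFinB (s : List (String × (List (String × Int))) × Option (String × (List (String × Int))) × List (String × (List (String × Int)))) :
    List (String × (List (String × Int))) :=
  match s.2.1 with
  | none => s.1
  | some o => s.1 ++ pvFlush o s.2.2

def expand_block_alt (elements : List (String × (List (String × Int)))) :
    List (String × (List (String × Int))) :=
  pvFinB (elements.foldl pvStepB ([], none, []))

-- ===== PRECONDITION & SPEC =====
-- Pre_ excludes (a) block elements whose dict has no key "n", on which Python A raises
-- KeyError, and (b) inner association lists with duplicate keys, which do not correspond
-- to any Python dict (a dict cannot hold two entries for one key).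
def Pre_expand_block (elements : List (String × (List (String × Int)))) : Prop :=
  (∀ e ∈ elements, e.1 = "block" → (List.lookup "n" e.2).isSome = true) ∧
  (∀ e ∈ elements, (e.2.map Prod.fst).Nodup)

instance (elements : List (String × (List (String × Int)))) : Decidable (Pre_expand_block elements) := by
  unfold Pre_expand_block; infer_instance

def pvWitness_expand_block : (List (String × (List (String × Int)))) :=
  [("block", [("n", 2)]), ("segment", [("t", 1)]), ("other", []), ("segment", [("t", 2)])]

def Spec_expand_block (elements : List (String × (List (String × Int)))) (out : List (String × (List (String × Int)))) : Prop := out = expand_block_alt elements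
instance (elements : List (String × (List (String × Int)))) (out : List (String × (List (String × Int)))) : Decidable (Spec_expand_block elements out) := by unfold Spec_expand_block; infer_instance

-- ===== CLAIM (what is proved, stated in full; the proofs are below) =====
def Claim_equal_expand_block : Prop := ∀ (elements : List (String × (List (String × Int)))), Dom_expand_block elements → Pre_expand_block elements → Spec_expand_block elements (expand_block elements)

-- ===== LEMMAS AND PROOFS =====

-- "is a segment" as a Bool predicate
def pvSeg (e : String × (List (String × Int))) : Bool := decide (e.1 = "segment")

-- common recursive characterisation of the output: skip leading segments; for each
-- owner, emit it followed by its (possibly repeated) run of following segments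
def pvBspec : List (String × (List (String × Int))) → List (String × (List (String × Int)))
  | [] => []
  | e :: t =>
    if e.1 = "segment" then pvBspec t
    else pvFlush e (t.takeWhile pvSeg) ++ pvBspec (t.dropWhile pvSeg)
termination_by l => l.length
decreasing_by
  · simp
  · have := List.length_dropWhile_le pvSeg t
    simp; omega

theorem pv_rep_rev (l : List (String × (List (String × Int)))) (n : Int) :
    (PySem.List.pyRepeat l n).reverse = PySem.List.pyRepeat l.reverse n := by
  simp [PySem.List.pyRepeat, List.reverse_flatten, List.map_replicate, List.reverse_replicate]

theorem pv_bspec_dropWhile (t : List (String × (List (String × Int)))) :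
    pvBspec (t.dropWhile pvSeg) = pvBspec t := by
  induction t with
  | nil => rfl
  | cons e t ih =>
    by_cases hs : e.1 = "segment"
    · rw [List.dropWhile_cons_of_pos (by simp [pvSeg, hs])]
      rw [ih, pvBspec]
      simp [hs]
    · rw [List.dropWhile_cons_of_neg (by simp [pvSeg, hs])]

theorem pv_L1 (t : List (String × (List (String × Int))))
    (out : List (String × (List (String × Int)))) (o : String × (List (String × Int)))
    (b : List (String × (List (String × Int)))) :
    pvFinB (t.foldl pvStepB (out, some o, b)) =
      out ++ pvFlush o (b ++ t.takeWhile pvSeg) ++ pvBspec (t.dropWhile pvSeg) := by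
  induction t generalizing out o b with
  | nil => simp [pvFinB, pvBspec]
  | cons e t ih =>
    by_cases hs : e.1 = "segment"
    · rw [List.foldl_cons]
      have hstep : pvStepB (out, some o, b) e = (out, some o, b ++ [e]) := by
        simp [pvStepB, hs]
      rw [hstep, ih]
      rw [List.takeWhile_cons_of_pos (by simp [pvSeg, hs]),
          List.dropWhile_cons_of_pos (by simp [pvSeg, hs])]
      simp
    · rw [List.foldl_cons]
      have hstep : pvStepB (out, some o, b) e = (out ++ pvFlush o b, some e, []) := by
        simp [pvStepB, hs]
      rw [hstep, ih]
      rw [List.takeWhile_cons_of_neg (by simp [pvSeg, hs]),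
          List.dropWhile_cons_of_neg (by simp [pvSeg, hs])]
      rw [pvBspec]
      simp [hs]

theorem pv_L2 (t : List (String × (List (String × Int))))
    (out : List (String × (List (String × Int))))
    (b : List (String × (List (String × Int)))) :
    pvFinB (t.foldl pvStepB (out, none, b)) = out ++ pvBspec t := by
  induction t generalizing out b with
  | nil => simp [pvFinB, pvBspec]
  | cons e t ih =>
    by_cases hs : e.1 = "segment"
    · rw [List.foldl_cons]
      have hstep : pvStepB (out, none, b) e = (out, none, b) := by
        simp [pvStepB, hs]
      rw [hstep, ih, pvBspec]
      simp [hs]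
    · rw [List.foldl_cons]
      have hstep : pvStepB (out, none, b) e = (out, some e, []) := by
        simp [pvStepB, hs]
      rw [hstep, pv_L1, pvBspec]
      simp [hs]

theorem pv_LA (l : List (String × (List (String × Int)))) :
    l.foldr (fun e s => pvStepA s e) ([], []) =
      ((pvBspec l).reverse, (l.takeWhile pvSeg).reverse) := by
  induction l with
  | nil => simp [pvBspec]
  | cons e t ih =>
    rw [List.foldr_cons, ih]
    by_cases hs : e.1 = "segment"
    · rw [pvBspec]
      rw [List.takeWhile_cons_of_pos (by simp [pvSeg, hs])]
      simp [pvStepA, hs]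
    · rw [pvBspec, List.takeWhile_cons_of_neg (by simp [pvSeg, hs])]
      simp only [hs, if_false]
      by_cases hb : e.1 = "block"
      · simp [pvStepA, hb, pvFlush, pv_bspec_dropWhile, pv_rep_rev]
      · simp [pvStepA, hs, hb, pvFlush, pv_bspec_dropWhile]

-- ===== VERDICT (by name: the statement is the Claim_ definition above) =====
theorem expand_block_spec : Claim_equal_expand_block := by
  intro elements _hdom _hpre
  unfold Spec_expand_block
  unfold expand_block expand_block_alt
  rw [List.foldl_reverse, pv_LA, pv_L2]
  simp
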